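-- pv_equiv track=rewrite | github.com/JackJosephWright/mana_bug_releases | mana_b_BLB.py | extract_log_block
-- ===== SOURCE A (Python) =====
-- def extract_log_block(log_text, search_string):
--     block_started = False
--     block_lines = []
--
--     for line in log_text.split('\n'):
--         if search_string in line:
--             block_started = True
--
--         if block_started:
--             block_lines.append(line)
--
--         if block_started and line.strip() == '':
--             break
--
--     if block_started:
--         return '\n'.join(block_lines)
--     else:
--         return None
-- ===== SOURCE B (Python) =====
-- def extract_log_block(log_text, search_string):
--     lines = log_text.split('\n')
--     start = next((i for i, l in enumerate(lines) if search_string in l), None)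
--     if start is None:
--         return None
--     end = next((start + j for j, l in enumerate(lines[start:]) if l.strip() == ''),
--                len(lines) - 1)
--     return '\n'.join(lines[start:end + 1])
-- ===== Notes on version B (the rewrite author's own statement) =====
-- stated objective: simpler
-- what changed: Replaces the flag-driven accumulate-and-break loop by a locate-then-slice computation: find the first matching line index, find the first blank line at or after it (default last line), and join the slice.
import Mathlib
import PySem

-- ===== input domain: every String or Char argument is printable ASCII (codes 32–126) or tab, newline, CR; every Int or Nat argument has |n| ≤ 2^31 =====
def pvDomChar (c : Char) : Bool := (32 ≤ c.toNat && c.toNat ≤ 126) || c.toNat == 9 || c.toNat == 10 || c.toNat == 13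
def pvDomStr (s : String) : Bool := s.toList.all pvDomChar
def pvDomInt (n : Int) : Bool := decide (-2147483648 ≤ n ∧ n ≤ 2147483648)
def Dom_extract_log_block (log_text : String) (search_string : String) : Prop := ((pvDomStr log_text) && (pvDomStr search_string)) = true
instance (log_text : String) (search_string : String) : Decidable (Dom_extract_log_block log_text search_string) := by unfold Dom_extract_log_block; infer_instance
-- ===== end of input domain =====

-- B replaces A's flag-driven accumulate-and-break loop by locate-then-slice (objective: simpler); equal on all inputs.

-- ===== PORT A =====
-- A's for-loop with break, as structural recursion over the lines with the loop state (block_started, block_lines)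
def pvALoop (search_string : String) : List String → Bool → List String → Bool × List String
  | [], started, acc => (started, acc)
  | l :: rest, started, acc =>
    let started' := if PySem.Str.isIn search_string l then true else started
    let acc' := if started' then acc ++ [l] else acc
    if started' && (PySem.Str.strip l == "") then (started', acc')
    else pvALoop search_string rest started' acc'

def extract_log_block (log_text : String) (search_string : String) : Option String :=
  let r := pvALoop search_string ((PySem.Str.split? log_text "\n").getD []) false []
  if r.1 then some (PySem.Str.join "\n" r.2) else none

-- ===== PORT B =====
def extract_log_block_alt (log_text : String) (search_string : String) : Option String :=
  let lines := (PySem.Str.split? log_text "\n").getD []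
  match lines.findIdx? (fun l => PySem.Str.isIn search_string l) with
  | none => none
  | some start =>
    let e : Nat :=
      match (lines.drop start).findIdx? (fun l => PySem.Str.strip l == "") with
      | some j => start + j
      | none => lines.length - 1
    some (PySem.Str.join "\n" (PySem.List.slice lines (some (start : Int)) (some ((e : Int) + 1))))

-- ===== PRECONDITION & SPEC =====
def Spec_extract_log_block (log_text : String) (search_string : String) (out : Option String) : Prop := out = extract_log_block_alt log_text search_string
instance (log_text : String) (search_string : String) (out : Option String) : Decidable (Spec_extract_log_block log_text search_string out) := by unfold Spec_extract_log_block; infer_instance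

-- ===== CLAIM (what is proved, stated in full; the proofs are below) =====
def Claim_equal_extract_log_block : Prop := ∀ (log_text : String) (search_string : String), Dom_extract_log_block log_text search_string → Spec_extract_log_block log_text search_string (extract_log_block log_text search_string)

-- ===== LEMMAS AND PROOFS =====

-- the block A accumulates once block_started is true: lines up to and including the first blank one
def pvBlock (lines : List String) : List String :=
  match lines.findIdx? (fun l => PySem.Str.strip l == "") with
  | some j => lines.take (j + 1)
  | none => lines

lemma pvBlock_cons_blank (l : String) (rest : List String)
    (hb : (PySem.Str.strip l == "") = true) : pvBlock (l :: rest) = [l] := by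
  simp [pvBlock, List.findIdx?_cons, hb]

lemma pvBlock_cons (l : String) (rest : List String)
    (hb : (PySem.Str.strip l == "") = false) : pvBlock (l :: rest) = l :: pvBlock rest := by
  simp only [pvBlock, List.findIdx?_cons, hb]
  cases rest.findIdx? (fun l => PySem.Str.strip l == "") <;> simp

lemma pvALoop_started (ss : String) (lines : List String) (acc : List String) :
    pvALoop ss lines true acc = (true, acc ++ pvBlock lines) := by
  induction lines generalizing acc with
  | nil => simp [pvALoop, pvBlock]
  | cons l rest ih =>
    cases hb : (PySem.Str.strip l == "")
    · simp only [pvALoop, hb, if_pos, ite_self, Bool.true_and, Bool.false_eq_true,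
        if_neg, not_false_iff, ih, pvBlock_cons l rest hb]
      simp
    · simp [pvALoop, hb, pvBlock_cons_blank l rest hb]

lemma pvALoop_search (ss : String) (lines : List String) :
    pvALoop ss lines false [] =
      match lines.findIdx? (fun l => PySem.Str.isIn ss l) with
      | none => (false, [])
      | some s => (true, pvBlock (lines.drop s)) := by
  induction lines with
  | nil => simp [pvALoop]
  | cons l rest ih =>
    cases hm : PySem.Str.isIn ss l
    · simp only [pvALoop, hm, Bool.false_and, Bool.false_eq_true,
        if_neg, not_false_iff, ih, List.findIdx?_cons]
      cases rest.findIdx? (fun l => PySem.Str.isIn ss l) <;> simp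
    · cases hb : (PySem.Str.strip l == "")
      · simp only [pvALoop, hm, if_pos, Bool.true_and, hb, Bool.false_eq_true, if_neg,
          not_false_iff, pvALoop_started, List.findIdx?_cons, List.drop_zero,
          pvBlock_cons l rest hb]
        simp
      · simp only [pvALoop, hm, if_pos, Bool.true_and, hb, List.findIdx?_cons,
          List.drop_zero, pvBlock_cons_blank l rest hb]
        simp

lemma pvSlice_eq_block (lines : List String) (s : Nat) (hs : s < lines.length) :
    PySem.List.slice lines (some (s : Int))
      (some (((match (lines.drop s).findIdx? (fun l => PySem.Str.strip l == "") with
               | some j => s + j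
               | none => lines.length - 1 : Nat) : Int) + 1)) = pvBlock (lines.drop s) := by
  cases h : (lines.drop s).findIdx? (fun l => PySem.Str.strip l == "") with
  | some j =>
    have he : ((s + j : Nat) : Int) + 1 = ((s + (j + 1) : Nat) : Int) := by push_cast; ring
    rw [he, PySem.List.slice_natCast]
    simp [pvBlock, h]
  | none =>
    have he : ((lines.length - 1 : Nat) : Int) + 1 = ((lines.length : Nat) : Int) := by
      have h1 : 1 ≤ lines.length := by omega
      omega
    rw [he, PySem.List.slice_natCast]
    simp [pvBlock, h, List.take_of_length_le, List.length_drop]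

-- ===== VERDICT (by name: the statement is the Claim_ definition above) =====
theorem extract_log_block_spec : Claim_equal_extract_log_block := by
  intro lt ss _
  unfold Spec_extract_log_block extract_log_block extract_log_block_alt
  rw [pvALoop_search]
  simp only [PySem.Str.isIn_eq]
  cases h : ((PySem.Str.split? lt "\n").getD []).findIdx?
      (fun l => PySem.Chars.isIn ss.toList l.toList) with
  | none => simp
  | some s =>
    have hs : s < ((PySem.Str.split? lt "\n").getD []).length :=
      (List.findIdx?_eq_some_iff_findIdx_eq.mp h).1
    simp only []
    rw [pvSlice_eq_block _ s hs]
    simp
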